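-- pv_equiv track=rewrite | github.com/altermarkive/training | algorithm-design/python/hackerrank/test_piling_up.py | check
-- ===== SOURCE A (Python) =====
-- import collections
--
-- def check(cubes):
--     q = collections.deque(cubes)
--     previous = None
--     while q:
--         left = q[0]
--         right = q[-1]
--         if left < right:
--             current = q.pop()
--         else:
--             current = q.popleft()
--         if previous is not None and previous < current:
--             return False
--         previous = current
--     return True
-- ===== SOURCE B (Python) =====
-- def check(cubes):
--     c = list(cubes)
--     n = len(c)
--     i = 0
--     while i + 1 < n and c[i] >= c[i + 1]:
--         i += 1
--     while i + 1 < n and c[i] <= c[i + 1]: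
--         i += 1
--     return i + 1 >= n
-- ===== Notes on version B (the rewrite author's own statement) =====
-- stated objective: simpler
-- what changed: Replaced the deque simulation of the greedy both-ends pile (pop the larger end, compare with previous) by a direct two-scan valley test: advance an index over the non-increasing prefix, then over the non-decreasing suffix, and succeed iff the end of the list is reached.
import Mathlib
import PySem

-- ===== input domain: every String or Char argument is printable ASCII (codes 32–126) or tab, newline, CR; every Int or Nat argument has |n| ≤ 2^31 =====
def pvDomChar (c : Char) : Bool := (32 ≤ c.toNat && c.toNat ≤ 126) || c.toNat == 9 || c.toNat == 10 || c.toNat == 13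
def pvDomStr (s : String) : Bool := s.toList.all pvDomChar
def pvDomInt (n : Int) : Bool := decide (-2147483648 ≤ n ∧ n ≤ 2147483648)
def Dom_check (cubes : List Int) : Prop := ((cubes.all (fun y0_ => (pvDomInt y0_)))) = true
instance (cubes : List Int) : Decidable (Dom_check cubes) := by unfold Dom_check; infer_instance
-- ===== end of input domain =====

-- B replaces A's deque simulation of the greedy both-ends pile by a plain two-scan
-- valley test (non-increasing prefix, then non-decreasing suffix); same result, simpler code.

-- ===== PORT A =====
-- A's while loop over the deque q, with `previous`; q[0] is the head and q[-1] the last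
-- element of the nonempty deque (getLastD 0; the default is never used since q ≠ []).
def checkLoop (q : List Int) (previous : Option Int) : Bool :=
  match q with
  | [] => true
  | x :: xs =>
    let right := (x :: xs).getLastD 0
    let current := if x < right then right else x       -- pop / popleft choice
    let q' := if x < right then (x :: xs).dropLast else xs
    match previous with
    | some p => if p < current then false else checkLoop q' (some current)
    | none => checkLoop q' (some current)
termination_by q.length
decreasing_by all_goals (split <;> simp)

def check (cubes : List Int) : Bool := checkLoop cubes none

-- ===== PORT B =====
-- first while loop: advance i while i+1 < n and c[i] >= c[i+1]
-- (the guard keeps both indices in range, so getD's default is never used)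
def bLoop1 (c : List Int) (i : Nat) : Nat :=
  if h : i + 1 < c.length ∧ c.getD (i + 1) 0 ≤ c.getD i 0 then bLoop1 c (i + 1) else i
termination_by c.length - i
decreasing_by omega

-- second while loop: advance i while i+1 < n and c[i] <= c[i+1]
def bLoop2 (c : List Int) (i : Nat) : Nat :=
  if h : i + 1 < c.length ∧ c.getD i 0 ≤ c.getD (i + 1) 0 then bLoop2 c (i + 1) else i
termination_by c.length - i
decreasing_by omega

def check_alt (cubes : List Int) : Bool :=
  decide (cubes.length ≤ bLoop2 cubes (bLoop1 cubes 0) + 1)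

-- ===== PRECONDITION & SPEC =====
def Spec_check (cubes : List Int) (out : Bool) : Prop := out = check_alt cubes
instance (cubes : List Int) (out : Bool) : Decidable (Spec_check cubes out) := by unfold Spec_check; infer_instance

-- ===== CLAIM (what is proved, stated in full; the proofs are below) =====
def Claim_equal_check : Prop := ∀ (cubes : List Int), Dom_check cubes → Spec_check cubes (check cubes)

-- ===== LEMMAS AND PROOFS =====

-- ND l : l is non-decreasing (adjacent pairs)
def ND (l : List Int) : Prop := List.IsChain (· ≤ ·) l

-- Valley l : a non-increasing prefix followed by a non-decreasing rest
def Valley : List Int → Prop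
  | [] => True
  | [_] => True
  | a :: b :: t => (b ≤ a ∧ Valley (b :: t)) ∨ ND (a :: b :: t)

theorem nd_valley (l : List Int) (h : ND l) : Valley l := by
  match l with
  | [] => trivial
  | [_] => trivial
  | a :: b :: t => exact Or.inr h

theorem nd_le_getLastD (a : Int) (t : List Int) (h : ND (a :: t)) :
    a ≤ (a :: t).getLastD 0 := by
  induction t generalizing a with
  | nil => simp
  | cons b t' ih =>
    rcases List.isChain_cons_cons.mp h with ⟨hab, h'⟩
    have := ih b h'
    simp only [List.getLastD_cons] at *
    omega

theorem nd_append_single (a : Int) (t : List Int) (z : Int) :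
    ND ((a :: t) ++ [z]) ↔ ND (a :: t) ∧ (a :: t).getLastD 0 ≤ z := by
  induction t generalizing a with
  | nil => simp [ND]
  | cons b t' ih =>
    show ND (a :: b :: (t' ++ [z])) ↔ _
    unfold ND
    rw [List.isChain_cons_cons]
    have := ih b
    unfold ND at this
    rw [show (b :: t') ++ [z] = b :: (t' ++ [z]) from rfl] at this
    rw [this, List.isChain_cons_cons]
    simp only [List.getLastD_cons]
    tauto

theorem vl_ge (a b : Int) (t : List Int) (h : b ≤ a) :
    Valley (a :: b :: t) ↔ Valley (b :: t) := by
  constructor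
  · rintro (⟨_, hv⟩ | hnd)
    · exact hv
    · exact nd_valley _ (List.IsChain.tail hnd)
  · intro hv; exact Or.inl ⟨h, hv⟩

theorem vl_lt (a b : Int) (t : List Int) (h : a < b) :
    Valley (a :: b :: t) ↔ ND (a :: b :: t) := by
  constructor
  · rintro (⟨hba, _⟩ | hnd)
    · omega
    · exact hnd
  · exact Or.inr

theorem vl_front (x b : Int) (t : List Int) (h : (b :: t).getLastD 0 ≤ x) :
    Valley (x :: b :: t) ↔ b ≤ x ∧ Valley (b :: t) := by
  constructor
  · rintro (⟨hbx, hv⟩ | hnd)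
    · exact ⟨hbx, hv⟩
    · have hxb : x ≤ b := (List.isChain_cons_cons.mp hnd).1
      have hnd' : ND (b :: t) := List.IsChain.tail hnd
      have := nd_le_getLastD b t hnd'
      exact ⟨by omega, nd_valley _ hnd'⟩
  · rintro ⟨hbx, hv⟩; exact Or.inl ⟨hbx, hv⟩

theorem vl_back (t : List Int) : ∀ a z : Int, a < z →
    (Valley ((a :: t) ++ [z]) ↔ (a :: t).getLastD 0 ≤ z ∧ Valley (a :: t)) := by
  induction t with
  | nil =>
    intro a z haz
    show (z ≤ a ∧ Valley [z]) ∨ ND [a, z] ↔ a ≤ z ∧ Valley [a]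
    have : ND [a, z] ↔ a ≤ z := by simp [ND]
    rw [this]
    show _ ↔ _ ∧ True
    constructor
    · rintro (⟨h, _⟩ | h)
      · omega
      · exact ⟨h, trivial⟩
    · rintro ⟨h, _⟩; exact Or.inr h
  | cons b t' ih =>
    intro a z haz
    have hnd := nd_append_single a (b :: t') z
    show (b ≤ a ∧ Valley ((b :: t') ++ [z])) ∨ ND ((a :: b :: t') ++ [z]) ↔
      (a :: b :: t').getLastD 0 ≤ z ∧ ((b ≤ a ∧ Valley (b :: t')) ∨ ND (a :: b :: t'))
    rw [show (a :: b :: t') ++ [z] = (a :: (b :: t')) ++ [z] from rfl, hnd]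
    by_cases hbz : b < z
    · rw [ih b z hbz]
      simp only [List.getLastD_cons]
      tauto
    · have hba : ¬ b ≤ a := by omega
      have hvz : ¬ Valley ((b :: t') ++ [z]) ∨ True := Or.inr trivial
      simp only [List.getLastD_cons]
      tauto

-- ===== A-side characterisation =====

theorem checkLoop_nil (prev : Option Int) : checkLoop [] prev = true := by
  rw [checkLoop]

theorem checkLoop_cons_none (x : Int) (xs : List Int) :
    checkLoop (x :: xs) none =
      checkLoop (if x < (x :: xs).getLastD 0 then (x :: xs).dropLast else xs)
        (some (if x < (x :: xs).getLastD 0 then (x :: xs).getLastD 0 else x)) := by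
  rw [checkLoop]

theorem checkLoop_cons_some (x : Int) (xs : List Int) (p : Int) :
    checkLoop (x :: xs) (some p) =
      (if p < (if x < (x :: xs).getLastD 0 then (x :: xs).getLastD 0 else x) then false
       else checkLoop (if x < (x :: xs).getLastD 0 then (x :: xs).dropLast else xs)
         (some (if x < (x :: xs).getLastD 0 then (x :: xs).getLastD 0 else x))) := by
  rw [checkLoop]

theorem checkLoop_some (x : Int) (xs : List Int) (p : Int) :
    checkLoop (x :: xs) (some p) =
      (decide ((if x < (x :: xs).getLastD 0 then (x :: xs).getLastD 0 else x) ≤ p) &&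
        checkLoop (x :: xs) none) := by
  rw [checkLoop_cons_some, checkLoop_cons_none]
  by_cases h2 : p < (if x < (x :: xs).getLastD 0 then (x :: xs).getLastD 0 else x)
  · rw [if_pos h2, decide_eq_false (by omega), Bool.false_and]
  · rw [if_neg h2, decide_eq_true (by omega), Bool.true_and]

theorem checkLoop_valley (l : List Int) : checkLoop l none = true ↔ Valley l := by
  have main : ∀ n (l : List Int), l.length ≤ n → (checkLoop l none = true ↔ Valley l) := by
    intro n
    induction n with
    | zero =>
      intro l hl
      have : l = [] := by cases l <;> simp_all
      subst this
      simp [checkLoop_nil, Valley]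
    | succ n ih =>
      intro l hl
      match l with
      | [] => simp [checkLoop_nil, Valley]
      | [x] =>
        rw [checkLoop_cons_none]
        have : ([x] : List Int).getLastD 0 = x := rfl
        rw [this, if_neg (lt_irrefl x), if_neg (lt_irrefl x), checkLoop_nil]
        simp [Valley]
      | x :: b :: t =>
        rw [checkLoop_cons_none]
        have hgl : (x :: b :: t).getLastD 0 = (b :: t).getLastD 0 := by
          simp
        rw [hgl]
        by_cases hxz : x < (b :: t).getLastD 0
        · -- pops from the right: q' = dropLast (x::b::t) = x :: dropLast (b::t)
          simp only [if_pos hxz]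
          have hdl : (x :: b :: t).dropLast = x :: (b :: t).dropLast := by simp
          rw [hdl]
          have h1 : b :: t = (b :: t).dropLast ++ [(b :: t).getLast (by simp)] :=
            (List.dropLast_concat_getLast (by simp)).symm
          have h2 : (b :: t).getLast (by simp) = (b :: t).getLastD 0 := by
            rw [List.getLastD_eq_getLast?, List.getLast?_eq_some_getLast (by simp)]
            rfl
          have hsplit : x :: b :: t = (x :: (b :: t).dropLast) ++ [(b :: t).getLastD 0] := by
            rw [List.cons_append]
            exact congrArg (x :: ·) (h2 ▸ h1)
          rw [checkLoop_some, Bool.and_eq_true, decide_eq_true_iff]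
          have hlen : (x :: (b :: t).dropLast).length ≤ n := by
            simp only [List.length_cons, List.length_dropLast] at hl ⊢
            simp at hl ⊢
            omega
          rw [ih _ hlen]
          rw [show Valley (x :: b :: t) ↔
              Valley ((x :: (b :: t).dropLast) ++ [(b :: t).getLastD 0]) from hsplit ▸ Iff.rfl]
          rw [vl_back ((b :: t).dropLast) x ((b :: t).getLastD 0) hxz]
          by_cases hc : x < (x :: (b :: t).dropLast).getLastD 0
          · rw [if_pos hc]
          · rw [if_neg hc]
            simp only [List.getLastD_cons] at hc hxz ⊢
            constructor
            · rintro ⟨_, hv⟩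
              exact ⟨by omega, hv⟩
            · rintro ⟨h', hv⟩
              exact ⟨by omega, hv⟩
        · -- pops from the left: q' = b :: t
          simp only [if_neg hxz]
          rw [checkLoop_some, Bool.and_eq_true, decide_eq_true_iff]
          have hlen : (b :: t).length ≤ n := by simp at hl ⊢; omega
          rw [ih _ hlen]
          have hzx : (b :: t).getLastD 0 ≤ x := by omega
          rw [vl_front x b t hzx]
          by_cases hc : b < (b :: t).getLastD 0
          · rw [if_pos hc]
            constructor
            · rintro ⟨_, hv⟩
              exact ⟨by omega, hv⟩
            · rintro ⟨_, hv⟩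
              exact ⟨hzx, hv⟩
          · rw [if_neg hc]
  exact main l.length l le_rfl

-- ===== B-side characterisation =====

theorem drop_cons_getD (c : List Int) (i : Nat) (h : i < c.length) :
    c.drop i = c.getD i 0 :: c.drop (i + 1) := by
  rw [List.getD_eq_getElem _ _ h]
  exact List.drop_eq_getElem_cons h

theorem nd_short (c : List Int) (i : Nat) (h : c.length ≤ i + 1) : ND (c.drop i) := by
  rcases hd : c.drop i with _ | ⟨a, rest⟩
  · exact List.isChain_nil
  · have : rest = [] := by
      have := congrArg List.length hd
      simp at this
      cases rest
      · rfl
      · simp at this; omega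
    subst this
    exact List.isChain_singleton a

theorem bLoop2_nd (c : List Int) (i : Nat) :
    (c.length ≤ bLoop2 c i + 1) ↔ ND (c.drop i) := by
  fun_induction bLoop2 c i with
  | case1 i h ih =>
    rcases h with ⟨hlt, hle⟩
    rw [ih]
    have hi : i < c.length := by omega
    rw [drop_cons_getD c i hi, drop_cons_getD c (i + 1) hlt]
    unfold ND
    rw [List.isChain_cons_cons, ← drop_cons_getD c (i + 1) hlt]
    exact (and_iff_right hle).symm
  | case2 i h =>
    by_cases hn : c.length ≤ i + 1
    · simp only [hn, true_iff]
      exact nd_short c i hn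
    · have hlt : i + 1 < c.length := by omega
      have hi : i < c.length := by omega
      have hgt : c.getD (i + 1) 0 < c.getD i 0 := by
        rcases not_and_or.mp h with h' | h' <;> omega
      simp only [hn, false_iff]
      intro hnd
      rw [drop_cons_getD c i hi, drop_cons_getD c (i + 1) hlt] at hnd
      have := (List.isChain_cons_cons.mp hnd).1
      omega

theorem bLoop1_valley (c : List Int) (i : Nat) :
    (c.length ≤ bLoop2 c (bLoop1 c i) + 1) ↔ Valley (c.drop i) := by
  fun_induction bLoop1 c i with
  | case1 i h ih =>
    rcases h with ⟨hlt, hle⟩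
    rw [ih]
    have hi : i < c.length := by omega
    rw [drop_cons_getD c i hi, drop_cons_getD c (i + 1) hlt]
    rw [vl_ge _ _ _ hle, ← drop_cons_getD c (i + 1) hlt]
  | case2 i h =>
    rw [bLoop2_nd]
    by_cases hn : c.length ≤ i + 1
    · have hnd := nd_short c i hn
      exact iff_of_true hnd (nd_valley _ hnd)
    · have hlt : i + 1 < c.length := by omega
      have hi : i < c.length := by omega
      have hgt : c.getD i 0 < c.getD (i + 1) 0 := by
        rcases not_and_or.mp h with h' | h' <;> omega
      rw [drop_cons_getD c i hi, drop_cons_getD c (i + 1) hlt,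
        vl_lt _ _ _ hgt, ← drop_cons_getD c (i + 1) hlt]

theorem check_alt_valley (c : List Int) : check_alt c = true ↔ Valley c := by
  unfold check_alt
  rw [decide_eq_true_iff, bLoop1_valley, List.drop_zero]

-- ===== VERDICT (by name: the statement is the Claim_ definition above) =====
theorem check_spec : Claim_equal_check := by
  intro cubes _
  unfold Spec_check check
  rw [Bool.eq_iff_iff, checkLoop_valley, check_alt_valley]
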